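-- pv_equiv track=rewrite | github.com/alse0722/pseudorandom_generators | gen.py | rsa
-- ===== SOURCE A (Python) =====
-- def rsa(nc, iv):
--     values = []
--     c = nc
--     n, e, x0, w, l = iv
--     x_all = []
--     for _ in range(c):
--         x0 = pow(x0, e, n)
--         xi_b = [int(d) for d in bin(x0)[2:]]
--         xi_b = [0] * (w - len(xi_b)) + xi_b
--         xi_b = xi_b[::-1][:w][::-1]
--         x_all += xi_b
--         values.append(int(''.join(str(x) for x in x_all[:l]), 2))
--         x_all = x_all[l:]
--     return values
-- ===== SOURCE B (Python) =====
-- def rsa(nc, iv):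
--     n, e, x0, w, l = iv
--     buf = 0
--     nbits = 0
--     values = []
--     for _ in range(nc):
--         x0 = pow(x0, e, n)
--         buf = (buf << w) | (x0 & ((1 << w) - 1))
--         nbits += w
--         take = l if l < nbits else nbits
--         values.append(buf >> (nbits - take))
--         nbits -= take
--         buf &= (1 << nbits) - 1
--     return values
-- ===== Notes on version B (the rewrite author's own statement) =====
-- stated objective: idiomatic
-- what changed: The list-of-bits buffer (binary-string conversion, zero padding, double reversal, slicing, join and int(_,2) reparse) is replaced by a single integer buffer plus a bit count, maintained with shift-and-mask arithmetic.
-- outside the precondition, e.g. on rsa(1, (7, -1, 3, 2, 2)): A returns [1], B returns [1]; on rsa(1, (-5, 1, 0, 2, 2)): A returns [0], B returns [0]; on rsa(2, (7, 3, 2, 2, -1)): A returns [0, 2], B returns [0, 0]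
import Mathlib
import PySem

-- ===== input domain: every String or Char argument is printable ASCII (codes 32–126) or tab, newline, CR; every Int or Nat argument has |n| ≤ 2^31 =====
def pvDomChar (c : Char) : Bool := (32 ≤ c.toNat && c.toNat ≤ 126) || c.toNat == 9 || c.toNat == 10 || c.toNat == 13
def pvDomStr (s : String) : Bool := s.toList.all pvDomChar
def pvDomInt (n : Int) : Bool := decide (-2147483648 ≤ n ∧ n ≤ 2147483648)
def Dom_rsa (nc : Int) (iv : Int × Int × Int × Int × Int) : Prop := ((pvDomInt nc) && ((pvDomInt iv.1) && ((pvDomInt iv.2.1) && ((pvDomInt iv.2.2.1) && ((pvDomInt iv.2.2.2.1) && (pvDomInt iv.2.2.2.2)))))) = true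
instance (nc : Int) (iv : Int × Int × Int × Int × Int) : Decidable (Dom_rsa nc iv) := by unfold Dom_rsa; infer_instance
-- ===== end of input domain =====

-- B replaces A's list-of-bits buffer (pad / reverse / slice / join / reparse) by a single
-- integer buffer maintained with shift-and-mask arithmetic (objective: idiomatic).


-- ===== PORT A =====

-- bin(x)[2:] as a list of 0/1 ints, MSB first; exact for 0 ≤ x (the only case reached under Pre_,
-- since x is always a result of pow(_, e, n) with n ≥ 1).
def pvBitsMSB (m : Nat) : List Int :=
  if h : m = 0 then [] else pvBitsMSB (m / 2) ++ [((m % 2 : Nat) : Int)]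
decreasing_by exact Nat.div_lt_self (Nat.pos_of_ne_zero h) one_lt_two

-- [int(d) for d in bin(x)[2:]]  (bin(0)[2:] = "0")
def pvBin (x : Int) : List Int := if x = 0 then [0] else pvBitsMSB x.toNat

-- int(''.join(str(b) for b in bs), 2): exact for a nonempty list of 0/1 digits, which is what
-- x_all[:l] always is under Pre_ (w ≥ 1, l ≥ 1).
def pvBitsVal (bs : List Int) : Int := bs.foldl (fun a b => 2 * a + b) 0

-- the body of A's `for _ in range(c)` loop; state = (x0, x_all, values)
def pvLoopA (n e w l : Int) : Nat → (Int × List Int × List Int) → List Int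
  | 0, st => st.2.2
  | k + 1, (x0, xall, values) =>
      let x0' := PySem.Int.powMod x0 e.toNat n          -- pow(x0, e, n); e.toNat exact for e ≥ 0
      let xb  := pvBin x0'
      let xb2 := List.replicate (w - (xb.length : Int)).toNat (0 : Int) ++ xb   -- [0]*(w-len) + xi_b
      let xi  := (xb2.reverse.take w.toNat).reverse     -- xi_b[::-1][:w][::-1]; exact for w ≥ 0
      let xall' := xall ++ xi
      let v := pvBitsVal (List.take l.toNat xall')      -- int(''.join(... x_all[:l]), 2); l ≥ 0
      pvLoopA n e w l k (x0', List.drop l.toNat xall', values ++ [v])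

def rsa (nc : Int) (iv : Int × Int × Int × Int × Int) : List Int :=
  pvLoopA iv.1 iv.2.1 iv.2.2.2.1 iv.2.2.2.2 nc.toNat (iv.2.2.1, [], [])

-- ===== PORT B =====

-- the body of B's loop; state = (x0, buf, nbits, values); shift amounts via .toNat (exact: they
-- are ≥ 0 whenever Pre_ holds, and Python raises on a negative shift)
def pvLoopB (n e w l : Int) : Nat → (Int × Int × Int × List Int) → List Int
  | 0, st => st.2.2.2
  | k + 1, (x0, buf, nbits, values) =>
      let x0' := PySem.Int.powMod x0 e.toNat n
      let buf1 := PySem.Int.bor (buf <<< w.toNat) (PySem.Int.band x0' (((1:Int) <<< w.toNat) - 1))  -- (buf<<w)|(x0&((1<<w)-1))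
      let nb := nbits + w
      let tk := if l < nb then l else nb                 -- take = l if l < nbits else nbits
      let v := buf1 >>> (nb - tk).toNat                  -- buf >> (nbits - take)
      let nb' := nb - tk
      let buf2 := PySem.Int.band buf1 (((1:Int) <<< nb'.toNat) - 1)  -- buf &= (1 << nbits) - 1
      pvLoopB n e w l k (x0', buf2, nb', values ++ [v])

def rsa_alt (nc : Int) (iv : Int × Int × Int × Int × Int) : List Int :=
  pvLoopB iv.1 iv.2.1 iv.2.2.2.1 iv.2.2.2.2 nc.toNat (iv.2.2.1, 0, 0, [])

-- ===== PRECONDITION & SPEC =====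

-- Pre_ excludes the inputs where the loop runs (nc ≥ 1) with a non-positive modulus n, a negative
-- exponent e, or a non-positive chunk width w or extraction length l: there A raises
-- (pow with modulus 0, pow ValueError for a non-invertible base, bin() of a negative residue,
-- int('', 2) on an empty slice) except on accidental corners (an invertible base under e < 0, a
-- base ≡ 0 under n < 0, a negative l that slices from the end), which no caller would rely on.
def Pre_rsa (nc : Int) (iv : Int × Int × Int × Int × Int) : Prop :=
  nc ≤ 0 ∨ (1 ≤ iv.1 ∧ 0 ≤ iv.2.1 ∧ 1 ≤ iv.2.2.2.1 ∧ 1 ≤ iv.2.2.2.2)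
instance (nc : Int) (iv : Int × Int × Int × Int × Int) : Decidable (Pre_rsa nc iv) := by
  unfold Pre_rsa; infer_instance

def pvWitness_rsa : Int × (Int × Int × Int × Int × Int) := (3, (7, 3, 5, 3, 4))

def Spec_rsa (nc : Int) (iv : Int × Int × Int × Int × Int) (out : List Int) : Prop := out = rsa_alt nc iv
instance (nc : Int) (iv : Int × Int × Int × Int × Int) (out : List Int) : Decidable (Spec_rsa nc iv out) := by unfold Spec_rsa; infer_instance

-- ===== CLAIM (what is proved, stated in full; the proofs are below) =====
def Claim_equal_rsa : Prop := ∀ (nc : Int) (iv : Int × Int × Int × Int × Int), Dom_rsa nc iv → Pre_rsa nc iv → Spec_rsa nc iv (rsa nc iv)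

-- ===== LEMMAS AND PROOFS =====

def pvBits01 (L : List Int) : Prop := ∀ b ∈ L, b = 0 ∨ b = 1

theorem pvBitsVal_acc (L : List Int) (a : Int) :
    L.foldl (fun a b => 2 * a + b) a = a * 2 ^ L.length + pvBitsVal L := by
  induction L generalizing a with
  | nil => simp [pvBitsVal]
  | cons c L ih =>
      simp only [List.foldl_cons, List.length_cons, pvBitsVal] at *
      rw [ih (2 * a + c), show (2*(0:Int)+c) = c by ring, ih c]
      ring

theorem pvBitsVal_append (A B : List Int) :
    pvBitsVal (A ++ B) = pvBitsVal A * 2 ^ B.length + pvBitsVal B := by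
  unfold pvBitsVal
  rw [List.foldl_append, pvBitsVal_acc B]
  rfl

theorem pvBitsVal_bounds (L : List Int) (h : pvBits01 L) :
    0 ≤ pvBitsVal L ∧ pvBitsVal L < 2 ^ L.length := by
  induction L with
  | nil => simp [pvBitsVal]
  | cons c L ih =>
      have hc : c = 0 ∨ c = 1 := h c (by simp)
      have hL : pvBits01 L := fun b hb => h b (by simp [hb])
      have := ih hL
      have hcons : pvBitsVal (c :: L) = c * 2 ^ L.length + pvBitsVal L := by
        have := pvBitsVal_append [c] L
        simpa [pvBitsVal] using this
      have hp : (0:Int) < 2 ^ L.length := by positivity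
      obtain ⟨ih0, ih1⟩ := this
      rcases hc with rfl | rfl
      · constructor
        · rw [hcons]; simpa using ih0
        · rw [hcons]; simp only [List.length_cons, pow_succ]; nlinarith
      · constructor
        · rw [hcons]; nlinarith
        · rw [hcons]; simp only [List.length_cons, pow_succ]; nlinarith

theorem pvBitsMSB_01 (m : Nat) : pvBits01 (pvBitsMSB m) := by
  induction m using Nat.strong_induction_on with
  | _ m ih =>
    unfold pvBitsMSB
    split
    · intro b hb; simp at hb
    · rename_i h
      intro b hb
      simp only [List.mem_append, List.mem_singleton] at hb
      rcases hb with hb | hb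
      · exact ih (m / 2) (Nat.div_lt_self (Nat.pos_of_ne_zero h) one_lt_two) b hb
      · subst hb; omega

theorem pvBitsMSB_val (m : Nat) : pvBitsVal (pvBitsMSB m) = m := by
  induction m using Nat.strong_induction_on with
  | _ m ih =>
    unfold pvBitsMSB
    split
    · rename_i h; simp [h, pvBitsVal]
    · rename_i h
      rw [pvBitsVal_append, ih (m / 2) (Nat.div_lt_self (Nat.pos_of_ne_zero h) one_lt_two)]
      simp [pvBitsVal]
      omega

theorem pvBin_01 (x : Int) : pvBits01 (pvBin x) := by
  unfold pvBin
  split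
  · intro b hb; simp at hb; left; exact hb
  · exact pvBitsMSB_01 x.toNat

theorem pvBin_val (x : Int) (hx : 0 ≤ x) : pvBitsVal (pvBin x) = x := by
  unfold pvBin
  split
  · rename_i h; simp [h, pvBitsVal]
  · rw [pvBitsMSB_val, Int.toNat_of_nonneg hx]

theorem pvBitsVal_replicate_zero (k : Nat) (L : List Int) :
    pvBitsVal (List.replicate k 0 ++ L) = pvBitsVal L := by
  rw [pvBitsVal_append]
  have : pvBitsVal (List.replicate k (0:Int)) = 0 := by
    induction k with
    | zero => rfl
    | succ k ih => simpa [pvBitsVal, List.replicate_succ] using ih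
  simp [this]

theorem pvBitsVal_take_drop (L : List Int) (h : pvBits01 L) (k : Nat) :
    pvBitsVal (L.take k) = pvBitsVal L / 2 ^ (L.length - k) ∧
    pvBitsVal (L.drop k) = pvBitsVal L % 2 ^ (L.length - k) := by
  have hsplit : L = L.take k ++ L.drop k := (List.take_append_drop k L).symm
  have hdl : (L.drop k).length = L.length - k := List.length_drop
  have hd01 : pvBits01 (L.drop k) := fun b hb => h b (List.mem_of_mem_drop hb)
  have hb := pvBitsVal_bounds (L.drop k) hd01
  have hv : pvBitsVal L = pvBitsVal (L.take k) * 2 ^ (L.length - k) + pvBitsVal (L.drop k) := by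
    conv_lhs => rw [hsplit]
    rw [pvBitsVal_append, hdl]
  have hp : (0:Int) < 2 ^ (L.length - k) := by positivity
  have hbd : 0 ≤ pvBitsVal (L.drop k) ∧ pvBitsVal (L.drop k) < 2 ^ (L.length - k) :=
    ⟨hb.1, hdl ▸ hb.2⟩
  constructor
  · rw [hv, add_comm, Int.add_mul_ediv_right _ _ (ne_of_gt hp),
      Int.ediv_eq_zero_of_lt hbd.1 hbd.2, zero_add]
  · rw [hv, add_comm, mul_comm, Int.add_mul_emod_self_left, Int.emod_eq_of_lt hbd.1 hbd.2]

-- x & ((1 << k) - 1) = x % 2^k for 0 ≤ x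
theorem pvBand_mask (x : Int) (hx : 0 ≤ x) (k : Nat) :
    PySem.Int.band x (((1:Int) <<< k) - 1) = x % 2 ^ k := by
  have h1 : ((1:Int) <<< k) - 1 = (2:Int) ^ k - 1 := by rw [Int.shiftLeft_eq]; ring
  have hm : (0:Int) ≤ (2:Int) ^ k - 1 := by
    have : (1:Int) ≤ 2 ^ k := one_le_pow₀ (by norm_num); omega
  rw [h1, PySem.Int.band_of_nonneg hx hm]
  have hcast : ((2:Int) ^ k) = ((2 ^ k : Nat) : Int) := by push_cast; ring
  have ht : ((2:Int) ^ k - 1).toNat = 2 ^ k - 1 := by omega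
  rw [ht, Nat.and_two_pow_sub_one_eq_mod]
  have : x % (2:Int) ^ k = ((x.toNat % 2 ^ k : Nat) : Int) := by
    push_cast
    rw [Int.toNat_of_nonneg hx]
  rw [this]

-- (buf << k) | r = buf * 2^k + r for 0 ≤ buf, 0 ≤ r < 2^k
theorem pvBor_shift (buf r : Int) (k : Nat) (hb : 0 ≤ buf) (hr : 0 ≤ r) (hrk : r < 2 ^ k) :
    PySem.Int.bor (buf <<< k) r = buf * 2 ^ k + r := by
  have hs : buf <<< k = buf * 2 ^ k := Int.shiftLeft_eq buf k
  have hs0 : 0 ≤ buf * 2 ^ k := by positivity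
  rw [hs, PySem.Int.bor_of_nonneg hs0 hr]
  have hcast : ((2:Int) ^ k) = ((2 ^ k : Nat) : Int) := by push_cast; ring
  have h2 : buf * 2 ^ k = ((2 ^ k * buf.toNat : Nat) : Int) := by
    push_cast [Int.toNat_of_nonneg hb]
    ring
  have hrn : r.toNat < 2 ^ k := by rw [hcast] at hrk; omega
  rw [h2, Int.toNat_natCast, ← Nat.two_pow_add_eq_or_of_lt hrn buf.toNat]
  push_cast [Int.toNat_of_nonneg hb, Int.toNat_of_nonneg hr]
  ring

-- characterisation of one produced chunk xi of A: exactly w low bits of x, MSB first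
theorem pvChunk_spec (x : Int) (hx : 0 ≤ x) (t : Nat) :
    pvBits01 (((List.replicate ((t : Int) - ((pvBin x).length : Int)).toNat (0:Int) ++ pvBin x).reverse.take t).reverse) ∧
    (((List.replicate ((t : Int) - ((pvBin x).length : Int)).toNat (0:Int) ++ pvBin x).reverse.take t).reverse).length = t ∧
    pvBitsVal (((List.replicate ((t : Int) - ((pvBin x).length : Int)).toNat (0:Int) ++ pvBin x).reverse.take t).reverse) = x % 2 ^ t := by
  set P := List.replicate ((t : Int) - ((pvBin x).length : Int)).toNat (0:Int) ++ pvBin x with hP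
  have hxi : (P.reverse.take t).reverse = P.drop (P.length - t) := by
    rw [List.take_reverse, List.reverse_reverse]
  have hlen0 : 1 ≤ (pvBin x).length := by
    unfold pvBin; split
    · simp
    · rename_i h
      unfold pvBitsMSB
      have hm : x.toNat ≠ 0 := by omega
      simp [hm]
  have hPlen : t ≤ P.length := by
    rw [hP, List.length_append, List.length_replicate]
    omega
  have hP01 : pvBits01 P := by
    intro b hb
    rw [hP, List.mem_append] at hb
    rcases hb with hb | hb
    · left; exact (List.eq_of_mem_replicate hb)
    · exact pvBin_01 x b hb
  have hPval : pvBitsVal P = x := by rw [hP, pvBitsVal_replicate_zero, pvBin_val x hx]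
  have htd := pvBitsVal_take_drop P hP01 (P.length - t)
  have hexp : P.length - (P.length - t) = t := by omega
  refine ⟨?_, ?_, ?_⟩
  · rw [hxi]; intro b hb; exact hP01 b (List.mem_of_mem_drop hb)
  · rw [hxi, List.length_drop]; omega
  · rw [hxi, htd.2, hexp, hPval]

-- the main loop invariant: buf is the value of x_all, nbits its length
theorem pvLoop_eq (n e w l : Int) (hn : 1 ≤ n) (hw : 1 ≤ w) (hl : 1 ≤ l) :
    ∀ (k : Nat) (x0 : Int) (xall values : List Int), pvBits01 xall →
      pvLoopA n e w l k (x0, xall, values) =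
      pvLoopB n e w l k (x0, pvBitsVal xall, (xall.length : Int), values) := by
  intro k
  induction k with
  | zero => intro x0 xall values _; rfl
  | succ k ih =>
      intro x0 xall values h01
      have hw0 : (0:Int) ≤ w := by omega
      have hwcast : ((w.toNat : Nat) : Int) = w := Int.toNat_of_nonneg hw0
      set x1 := PySem.Int.powMod x0 e.toNat n with hx1
      have hx10 : 0 ≤ x1 := PySem.Int.powMod_nonneg x0 e.toNat hn
      have hchunk := pvChunk_spec x1 hx10 w.toNat
      rw [hwcast] at hchunk
      obtain ⟨hxi01, hxilen, hxival⟩ := hchunk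
      set xi := ((List.replicate (w - ((pvBin x1).length : Int)).toNat (0:Int) ++
        pvBin x1).reverse.take w.toNat).reverse with hxi
      have h01' : pvBits01 (xall ++ xi) := by
        intro b hb
        rcases List.mem_append.mp hb with hb | hb
        · exact h01 b hb
        · exact hxi01 b hb
      have hlen' : (xall ++ xi).length = xall.length + w.toNat := by
        rw [List.length_append, hxilen]
      have hbnd := pvBitsVal_bounds xall h01
      have hbnd' := pvBitsVal_bounds (xall ++ xi) h01'
      have hp : (0:Int) < 2 ^ w.toNat := by positivity
      -- B's buf after shift-or equals the value of the extended bit list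
      have hbuf1 : PySem.Int.bor (pvBitsVal xall <<< w.toNat)
          (PySem.Int.band x1 (((1:Int) <<< w.toNat) - 1)) = pvBitsVal (xall ++ xi) := by
        rw [pvBand_mask x1 hx10 w.toNat,
          pvBor_shift (pvBitsVal xall) (x1 % 2 ^ w.toNat) w.toNat hbnd.1
            (Int.emod_nonneg x1 (ne_of_gt hp)) (Int.emod_lt_of_pos x1 hp),
          pvBitsVal_append, hxilen, hxival]
      have htd := pvBitsVal_take_drop (xall ++ xi) h01' l.toNat
      have hnb : ((xall.length : Nat) : Int) + w = (((xall ++ xi).length : Nat) : Int) := by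
        rw [hlen']; push_cast; omega
      -- the shift amount on B's side is the number of bits left behind
      have hsh : ((((xall ++ xi).length : Nat) : Int) -
          (if l < (((xall ++ xi).length : Nat) : Int) then l
           else (((xall ++ xi).length : Nat) : Int))).toNat = (xall ++ xi).length - l.toNat := by
        split <;> omega
      -- A's extracted value = B's shifted buffer
      have hv : pvBitsVal (List.take l.toNat (xall ++ xi)) =
          pvBitsVal (xall ++ xi) >>> ((xall ++ xi).length - l.toNat) := by
        rw [Int.shiftRight_eq_div_pow, htd.1]
        norm_cast
      -- B's masked buffer = value of the remaining bits
      have hbuf2 : PySem.Int.band (pvBitsVal (xall ++ xi))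
          (((1:Int) <<< ((xall ++ xi).length - l.toNat)) - 1) =
          pvBitsVal (List.drop l.toNat (xall ++ xi)) := by
        rw [pvBand_mask _ hbnd'.1, htd.2]
      have hdroplen : (((List.drop l.toNat (xall ++ xi)).length : Nat) : Int) =
          (((xall ++ xi).length : Nat) : Int) -
          (if l < (((xall ++ xi).length : Nat) : Int) then l
           else (((xall ++ xi).length : Nat) : Int)) := by
        rw [List.length_drop]; split <;> omega
      have hd01 : pvBits01 (List.drop l.toNat (xall ++ xi)) := by
        intro b hb; exact h01' b (List.mem_of_mem_drop hb)
      simp only [pvLoopA, pvLoopB]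
      rw [← hx1, ← hxi, ih x1 (List.drop l.toNat (xall ++ xi)) _ hd01, hbuf1, hnb, hsh, hbuf2, ← hv,
        ← hdroplen]

-- ===== VERDICT (by name: the statement is the Claim_ definition above) =====
theorem rsa_spec : Claim_equal_rsa := by
  intro nc iv _hdom hpre
  unfold Spec_rsa rsa rsa_alt
  rcases hpre with hnc | ⟨hn, he, hw, hl⟩
  · have : nc.toNat = 0 := by omega
    rw [this]; rfl
  · have h := pvLoop_eq iv.1 iv.2.1 iv.2.2.2.1 iv.2.2.2.2 hn hw hl nc.toNat iv.2.2.1 [] []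
      (by intro b hb; simp at hb)
    simpa [pvBitsVal] using h
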